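-- pv_equiv track=rewrite | github.com/polkduran/pbs | Uva/11203_state_machine.py | parse
-- ===== SOURCE A (Python) =====
-- def parse(strToChek):
--   state = 0
--   x = 0
--   y = 0
--   z = 0
--
--   for c in strToChek:
--     # state 0 not init
--     if state == 0:
--       if c == '?':
--         state = 1
--         x += 1
--         continue
--       return False
--     # state 1 X
--     if state == 1:
--       if c == '?':
--         x += 1
--         continue
--       if c == 'M':
--         state = 2
--         continue
--       return False
--     # state 2 M
--     if state == 2:
--       if c == '?':
--         state = 3
--         y += 1
--         continue
--       return False
--     # state 3 Y
--     if state == 3: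
--       if c == '?':
--         y += 1
--         continue
--       if c == 'E':
--         state = 4
--         continue
--       return False
--     # state 4 E
--     if state == 4:
--       if c == '?':
--         state = 5
--         z += 1
--         continue
--       return False
--     # state 5 Z
--     if state == 5:
--       if c == '?':
--         z += 1
--         continue
--       return False
--
--   if state == 5:
--     return (x,y,z)
--   return False
-- ===== SOURCE B (Python) =====
-- def parse(strToChek):
--   cs = list(strToChek)
--   if set(cs) <= {'?', 'M', 'E'} and cs.count('M') == 1 and cs.count('E') == 1:
--     mi = cs.index('M')
--     ei = cs.index('E')
--     x = mi
--     y = ei - mi - 1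
--     z = len(cs) - ei - 1
--     if x >= 1 and y >= 1 and z >= 1:
--       return (x, y, z)
--   return False
-- ===== Notes on version B (the rewrite author's own statement) =====
-- stated objective: simpler
-- what changed: Replaced the char-by-char six-state machine with delimiter finding: check the alphabet is {?,M,E} with exactly one M and one E, read off the three segment lengths from the positions of M and E, and require each to be at least 1.
import Mathlib
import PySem

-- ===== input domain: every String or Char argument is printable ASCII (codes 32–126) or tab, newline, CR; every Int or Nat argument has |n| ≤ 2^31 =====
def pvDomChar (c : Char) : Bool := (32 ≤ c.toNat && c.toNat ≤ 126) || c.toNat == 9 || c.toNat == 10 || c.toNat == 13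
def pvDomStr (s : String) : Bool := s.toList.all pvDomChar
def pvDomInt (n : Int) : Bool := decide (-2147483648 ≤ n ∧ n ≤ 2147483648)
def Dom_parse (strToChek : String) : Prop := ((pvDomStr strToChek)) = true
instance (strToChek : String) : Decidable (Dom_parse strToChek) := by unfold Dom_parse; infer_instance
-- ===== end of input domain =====

-- B replaces A's six-state character-by-character machine by delimiter finding (counts and
-- positions of the unique 'M' and 'E'); objective: simpler. Both Pythons return the truthy
-- tuple (x,y,z) on accepting inputs and False otherwise; under the Bool return convention
-- both ports render that accepting outcome as `true`, and the equivalence is total.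

-- ===== PORT A =====
-- the for-loop of A: state/x/y/z as in the Python, early `return False` = false
def parseGo : List Char → Int → Int → Int → Int → Bool
  | [], state, _x, _y, _z => if state == 5 then true else false
      -- Python: `if state == 5: return (x,y,z)` — truthy tuple rendered as `true`
  | c :: rest, state, x, y, z =>
    if state == 0 then
      (if c == '?' then parseGo rest 1 (x+1) y z else false)
    else if state == 1 then
      (if c == '?' then parseGo rest 1 (x+1) y z
       else if c == 'M' then parseGo rest 2 x y z
       else false)
    else if state == 2 then
      (if c == '?' then parseGo rest 3 x (y+1) z else false)
    else if state == 3 then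
      (if c == '?' then parseGo rest 3 x (y+1) z
       else if c == 'E' then parseGo rest 4 x y z
       else false)
    else if state == 4 then
      (if c == '?' then parseGo rest 5 x y (z+1) else false)
    else if state == 5 then
      (if c == '?' then parseGo rest 5 x y (z+1) else false)
    else false

def parse (strToChek : String) : Bool := parseGo strToChek.toList 0 0 0 0

-- ===== PORT B =====
def parse_alt (strToChek : String) : Bool :=
  let cs := strToChek.toList
  if PySem.Set.issubset (PySem.Set.ofList cs) ['?', 'M', 'E']
      && PySem.List.count cs 'M' == 1 && PySem.List.count cs 'E' == 1 then
    match PySem.List.index? cs 'M', PySem.List.index? cs 'E' with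
    | some mi, some ei =>
      let x : Int := mi
      let y : Int := (ei : Int) - mi - 1
      let z : Int := (cs.length : Int) - ei - 1
      if 1 ≤ x ∧ 1 ≤ y ∧ 1 ≤ z then true else false
        -- Python returns the truthy tuple (x, y, z) here — rendered `true`
    | _, _ => false  -- unreachable: count = 1 guarantees membership (Python .index cannot raise here)
  else false

-- ===== PRECONDITION & SPEC =====
def Spec_parse (strToChek : String) (out : Bool) : Prop := out = parse_alt strToChek
instance (strToChek : String) (out : Bool) : Decidable (Spec_parse strToChek out) := by unfold Spec_parse; infer_instance

-- ===== CLAIM (what is proved, stated in full; the proofs are below) =====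
def Claim_equal_parse : Prop := ∀ (strToChek : String), Dom_parse strToChek → Spec_parse strToChek (parse strToChek)

-- ===== LEMMAS AND PROOFS =====

-- the accepted language, as a shape
def Shape (l : List Char) : Prop :=
  ∃ a b c : Nat, 1 ≤ a ∧ 1 ≤ b ∧ 1 ≤ c ∧
    l = List.replicate a '?' ++ 'M' :: (List.replicate b '?' ++ 'E' :: List.replicate c '?')

lemma go5_iff (l : List Char) (x y z : Int) :
    parseGo l 5 x y z = true ↔ ∀ c ∈ l, c = '?' := by
  induction l generalizing x y z with
  | nil => simp [parseGo]
  | cons c rest ih =>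
    by_cases hc : c = '?'
    · subst hc; simp [parseGo, ih]
    · simp [parseGo, hc]

lemma go4_iff (l : List Char) (x y z : Int) :
    parseGo l 4 x y z = true ↔ ∃ n : Nat, 1 ≤ n ∧ l = List.replicate n '?' := by
  cases l with
  | nil => simp [parseGo]
  | cons c rest =>
    by_cases hc : c = '?'
    · subst hc
      simp only [parseGo]
      norm_num [go5_iff]
      constructor
      · intro h
        exact ⟨rest.length + 1, by omega, by
          simp only [List.replicate_succ, List.cons.injEq, true_and]
          exact (List.eq_replicate_iff.mpr ⟨rfl, h⟩)⟩
      · rintro ⟨n, hn, h⟩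
        obtain ⟨m, rfl⟩ : ∃ m, n = m + 1 := ⟨n - 1, by omega⟩
        simp [List.replicate_succ] at h
        intro d hd
        rw [h] at hd
        exact List.eq_of_mem_replicate hd
    · simp [parseGo, hc]
      rintro n hn h
      obtain ⟨m, rfl⟩ : ∃ m, n = m + 1 := ⟨n - 1, by omega⟩
      simp [List.replicate_succ] at h
      exact hc h.1

lemma go3_iff (l : List Char) (x y z : Int) :
    parseGo l 3 x y z = true ↔
      ∃ b c : Nat, 1 ≤ c ∧ l = List.replicate b '?' ++ 'E' :: List.replicate c '?' := by
  induction l generalizing x y z with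
  | nil => simp [parseGo]
  | cons c rest ih =>
    by_cases hc : c = '?'
    · subst hc
      simp only [parseGo]
      norm_num [ih]
      constructor
      · rintro ⟨b, cc, hcc, rfl⟩
        exact ⟨b + 1, cc, hcc, by simp [List.replicate_succ]⟩
      · rintro ⟨b, cc, hcc, h⟩
        obtain ⟨m, rfl⟩ : ∃ m, b = m + 1 := by
          rcases b with _ | m
          · exact absurd h (by simp)
          · exact ⟨m, rfl⟩
        simp [List.replicate_succ] at h
        exact ⟨m, cc, hcc, h⟩
    · by_cases he : c = 'E'
      · subst he
        simp only [parseGo]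
        norm_num [go4_iff]
        constructor
        · rintro ⟨n, hn, rfl⟩
          exact ⟨0, n, hn, by simp⟩
        · rintro ⟨b, cc, hcc, h⟩
          rcases b with _ | m
          · simp at h
            exact ⟨cc, hcc, h⟩
          · exact absurd h (by simp [List.replicate_succ])
      · simp [parseGo, hc, he]
        rintro b cc hcc h
        rcases b with _ | m
        · simp at h
          exact he h.1
        · simp [List.replicate_succ] at h
          exact hc h.1

lemma go2_iff (l : List Char) (x y z : Int) :
    parseGo l 2 x y z = true ↔
      ∃ b c : Nat, 1 ≤ b ∧ 1 ≤ c ∧ l = List.replicate b '?' ++ 'E' :: List.replicate c '?' := by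
  cases l with
  | nil => simp [parseGo]
  | cons c rest =>
    by_cases hc : c = '?'
    · subst hc
      have hred : parseGo ('?' :: rest) 2 x y z = parseGo rest 3 x (y+1) z := rfl
      rw [hred, go3_iff]
      constructor
      · rintro ⟨b, cc, hcc, rfl⟩
        exact ⟨b + 1, cc, by omega, hcc, by simp [List.replicate_succ]⟩
      · rintro ⟨b, cc, hb, hcc, h⟩
        obtain ⟨m, rfl⟩ : ∃ m, b = m + 1 := ⟨b - 1, by omega⟩
        simp [List.replicate_succ] at h
        exact ⟨m, cc, hcc, h⟩
    · simp [parseGo, hc]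
      rintro b cc hb hcc h
      obtain ⟨m, rfl⟩ : ∃ m, b = m + 1 := ⟨b - 1, by omega⟩
      simp [List.replicate_succ] at h
      exact hc h.1

lemma go1_iff (l : List Char) (x y z : Int) :
    parseGo l 1 x y z = true ↔
      ∃ a b c : Nat, 1 ≤ b ∧ 1 ≤ c ∧
        l = List.replicate a '?' ++ 'M' :: (List.replicate b '?' ++ 'E' :: List.replicate c '?') := by
  induction l generalizing x y z with
  | nil => simp [parseGo]
  | cons c rest ih =>
    by_cases hc : c = '?'
    · subst hc
      simp only [parseGo]
      norm_num [ih]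
      constructor
      · rintro ⟨a, b, cc, hb, hcc, rfl⟩
        exact ⟨a + 1, b, cc, hb, hcc, by simp [List.replicate_succ]⟩
      · rintro ⟨a, b, cc, hb, hcc, h⟩
        obtain ⟨m, rfl⟩ : ∃ m, a = m + 1 := by
          rcases a with _ | m
          · exact absurd h (by simp)
          · exact ⟨m, rfl⟩
        simp [List.replicate_succ] at h
        exact ⟨m, b, cc, hb, hcc, h⟩
    · by_cases hm : c = 'M'
      · subst hm
        simp only [parseGo]
        norm_num [go2_iff]
        constructor
        · rintro ⟨b, cc, hb, hcc, rfl⟩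
          exact ⟨0, b, cc, hb, hcc, by simp⟩
        · rintro ⟨a, b, cc, hb, hcc, h⟩
          rcases a with _ | m
          · simp at h
            exact ⟨b, cc, hb, hcc, h⟩
          · exact absurd h (by simp [List.replicate_succ])
      · simp [parseGo, hc, hm]
        rintro a b cc hb hcc h
        rcases a with _ | m
        · simp at h
          exact hm h.1
        · simp [List.replicate_succ] at h
          exact hc h.1

lemma parse_iff (s : String) : parse s = true ↔ Shape s.toList := by
  unfold parse Shape
  cases hl : s.toList with
  | nil => simp [parseGo]
  | cons c rest =>
    by_cases hc : c = '?'
    · subst hc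
      have hred : parseGo ('?' :: rest) 0 0 0 0 = parseGo rest 1 1 0 0 := rfl
      rw [hred, go1_iff]
      constructor
      · rintro ⟨a, b, cc, hb, hcc, rfl⟩
        exact ⟨a + 1, b, cc, by omega, hb, hcc, by simp [List.replicate_succ]⟩
      · rintro ⟨a, b, cc, ha, hb, hcc, h⟩
        obtain ⟨m, rfl⟩ : ∃ m, a = m + 1 := ⟨a - 1, by omega⟩
        simp [List.replicate_succ] at h
        exact ⟨m, b, cc, hb, hcc, h⟩
    · simp [parseGo, hc]
      rintro a b cc ha hb hcc h
      obtain ⟨m, rfl⟩ : ∃ m, a = m + 1 := ⟨a - 1, by omega⟩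
      simp [List.replicate_succ] at h
      exact hc h.1

lemma idx_append_of_not_mem (u t : List Char) (v : Char) (h : v ∉ u) :
    PySem.List.index? (u ++ t) v = (PySem.List.index? t v).map (· + u.length) := by
  induction u with
  | nil => simp
  | cons a u ih =>
    simp only [List.mem_cons, not_or] at h
    rw [List.cons_append, PySem.List.index?_cons_of_ne (u ++ t) (fun he => h.1 he.symm), ih h.2]
    cases PySem.List.index? t v
    · simp
    · simp
      omega

lemma all_qm (l : List Char) (hall : ∀ x ∈ l, x = '?' ∨ x = 'M' ∨ x = 'E')
    (hM : 'M' ∉ l) (hE : 'E' ∉ l) : l = List.replicate l.length '?' := by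
  rw [List.eq_replicate_iff]
  refine ⟨rfl, fun x hx => ?_⟩
  rcases hall x hx with h | h | h
  · exact h
  · exact absurd (h ▸ hx) hM
  · exact absurd (h ▸ hx) hE

lemma parse_alt_iff (s : String) : parse_alt s = true ↔ Shape s.toList := by
  unfold parse_alt Shape
  constructor
  · intro h
    simp only at h
    split_ifs at h with hg
    · -- guard holds; analyse the match and the final if
      simp only [Bool.and_eq_true, beq_iff_eq, PySem.Set.issubset_iff,
        PySem.Set.mem_ofList, PySem.List.count_eq] at hg
      obtain ⟨⟨hall, hcM⟩, hcE⟩ := hg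
      rcases hmi : PySem.List.index? s.toList 'M' with _ | mi <;> rw [hmi] at h
      · exact absurd h (by simp)
      rcases hei : PySem.List.index? s.toList 'E' with _ | ei <;> rw [hei] at h
      · exact absurd h (by simp)
      replace h : (if (1:Int) ≤ (mi:Int) ∧ 1 ≤ (ei:Int) - mi - 1
          ∧ 1 ≤ (s.toList.length:Int) - ei - 1 then true else false) = true := h
      split_ifs at h with hcond
      obtain ⟨h1, h2, h3⟩ := hcond
      obtain ⟨u, v, hcs, hulen, hMu⟩ := (PySem.List.index?_eq_some_iff _ _ _).mp hmi
      -- 'E' is not in the prefix u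
      have hEu : 'E' ∉ u := by
        intro hmem
        obtain ⟨k, hk⟩ := Option.isSome_iff_exists.mp ((PySem.List.index?_isSome_iff u 'E').mpr hmem)
        obtain ⟨p, q, _, hplen, _⟩ := (PySem.List.index?_eq_some_iff _ _ _).mp hk
        have hklt : k < u.length := by
          have := congrArg List.length ‹u = p ++ 'E' :: q›
          simp at this; omega
        have := hei
        rw [hcs, PySem.List.index?_append_of_mem _ hmem, hk] at this
        have : k = ei := by simpa using this
        omega
      -- locate 'E' inside v
      have hvE : PySem.List.index? v 'E' = some (ei - u.length - 1) := by
        have h' := hei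
        rw [hcs, idx_append_of_not_mem u _ 'E' hEu,
          PySem.List.index?_cons_of_ne v (by decide : ('M':Char) ≠ 'E')] at h'
        rcases hv : PySem.List.index? v 'E' with _ | k <;> rw [hv] at h'
        · exact absurd h' (by simp)
        · have : k + 1 + u.length = ei := by simpa using h'
          congr 1; omega
      obtain ⟨w, t, hv, hwlen, hEw⟩ := (PySem.List.index?_eq_some_iff _ _ _).mp hvE
      have hcs' : s.toList = u ++ 'M' :: (w ++ 'E' :: t) := by rw [hcs, hv]
      -- counts pin down absences
      have hMw : 'M' ∉ w ∧ 'M' ∉ t := by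
        have := hcM; rw [hcs'] at this
        simp [List.count_append] at this
        exact ⟨List.count_eq_zero.mp (by omega), List.count_eq_zero.mp (by omega)⟩
      have hEt : 'E' ∉ t := by
        have := hcE; rw [hcs'] at this
        have hcEu : List.count 'E' u = 0 := List.count_eq_zero.mpr hEu
        have hcEw : List.count 'E' w = 0 := List.count_eq_zero.mpr hEw
        simp [List.count_append, hcEu, hcEw] at this
        exact List.count_eq_zero.mp (by omega)
      have hallm : ∀ x ∈ s.toList, x = '?' ∨ x = 'M' ∨ x = 'E' := by
        intro x hx; simpa using hall x hx
      have hu : u = List.replicate u.length '?' :=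
        all_qm u (fun x hx => hallm x (by rw [hcs']; simp [hx])) hMu hEu
      have hw : w = List.replicate w.length '?' :=
        all_qm w (fun x hx => hallm x (by rw [hcs']; simp [hx])) hMw.1 hEw
      have ht : t = List.replicate t.length '?' :=
        all_qm t (fun x hx => hallm x (by rw [hcs']; simp [hx])) hMw.2 hEt
      have hlen : s.toList.length = u.length + 1 + w.length + 1 + t.length := by
        rw [hcs']; simp; omega
      refine ⟨u.length, w.length, t.length, by omega, by omega, by omega, ?_⟩
      rw [hcs', ← hu, ← hw, ← ht]
  · rintro ⟨a, b, c, ha, hb, hc, hl⟩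
    simp only [hl]
    have hMa : 'M' ∉ List.replicate a '?' := by simp
    have hmi : PySem.List.index? (List.replicate a '?' ++ 'M' ::
        (List.replicate b '?' ++ 'E' :: List.replicate c '?')) 'M' = some a :=
      (PySem.List.index?_eq_some_iff _ _ _).mpr ⟨List.replicate a '?', _, rfl, by simp, hMa⟩
    have hEpre : 'E' ∉ List.replicate a '?' ++ 'M' :: List.replicate b '?' := by simp
    have hei : PySem.List.index? (List.replicate a '?' ++ 'M' ::
        (List.replicate b '?' ++ 'E' :: List.replicate c '?')) 'E' = some (a + 1 + b) :=
      (PySem.List.index?_eq_some_iff _ _ _).mpr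
        ⟨List.replicate a '?' ++ 'M' :: List.replicate b '?', List.replicate c '?',
          by simp, by simp; omega, hEpre⟩
    split_ifs with hg
    · rw [hmi, hei]
      simp
      omega
    · exfalso
      apply hg
      simp only [Bool.and_eq_true, beq_iff_eq, PySem.Set.issubset_iff,
        PySem.Set.mem_ofList, PySem.List.count_eq]
      refine ⟨⟨fun x hx => ?_, ?_⟩, ?_⟩
      · simp only [List.mem_append, List.mem_cons, List.mem_replicate] at hx
        rcases hx with ⟨_, h⟩ | h | ⟨_, h⟩ | h | ⟨_, h⟩ <;> simp [h]
      · simp [List.count_append, List.count_replicate]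
      · simp [List.count_append, List.count_replicate]

lemma parse_eq_alt (s : String) : parse s = parse_alt s := by
  by_cases h : Shape s.toList
  · rw [(parse_iff s).mpr h, (parse_alt_iff s).mpr h]
  · have ha : parse s ≠ true := fun hh => h ((parse_iff s).mp hh)
    have hb : parse_alt s ≠ true := fun hh => h ((parse_alt_iff s).mp hh)
    simp only [Bool.not_eq_true] at ha hb
    rw [ha, hb]

-- ===== VERDICT (by name: the statement is the Claim_ definition above) =====
theorem parse_spec : Claim_equal_parse := by
  intro s _
  exact parse_eq_alt s
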